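-- pv_equiv track=rewrite | github.com/zqwerty/test_tasktk | tasktk/nlg/lstm_nlg.py | diaact_to_nl_slot_filling
-- ===== SOURCE A (Python) =====
-- I_DO_NOT_CARE = "I do not care"
--
-- NO_VALUE_MATCH = "NO VALUE MATCHES!!!"
--
-- def diaact_to_nl_slot_filling(dia_act, template_sentence):
--     """ Replace the slots with its values """
--
--     sentence = template_sentence
--     counter = 0
--     for slot in dia_act['inform_slots'].keys():
--         slot_val = dia_act['inform_slots'][slot]
--         if slot_val == NO_VALUE_MATCH:
--             sentence = slot + " is not available!"
--             break
--         elif slot_val == I_DO_NOT_CARE: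
--             counter += 1
--             sentence = sentence.replace('$'+slot+'$', '', 1)
--             continue
--
--         sentence = sentence.replace('$'+slot+'$', slot_val, 1)
--
--     if counter > 0 and counter == len(dia_act['inform_slots']):
--         sentence = I_DO_NOT_CARE
--
--     return sentence
-- ===== SOURCE B (Python) =====
-- I_DO_NOT_CARE = "I do not care"
--
-- NO_VALUE_MATCH = "NO VALUE MATCHES!!!"
--
-- def diaact_to_nl_slot_filling(dia_act, template_sentence):
--     """ Replace the slots with its values (guard-first, multi-pass) """
--     slots = dia_act['inform_slots']
--     for slot, val in slots.items():
--         if val == NO_VALUE_MATCH: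
--             return slot + " is not available!"
--     if slots and all(v == I_DO_NOT_CARE for v in slots.values()):
--         return I_DO_NOT_CARE
--     sentence = template_sentence
--     for slot, val in slots.items():
--         sentence = sentence.replace('$' + slot + '$', '' if val == I_DO_NOT_CARE else val, 1)
--     return sentence
-- ===== Notes on version B (the rewrite author's own statement) =====
-- stated objective: alternative
-- what changed: A's single interleaved loop with a break, a running counter and a leftover-state check is replaced by a guard-first multi-pass structure: one scan for the first NO_VALUE_MATCH slot, one non-empty/all-I_DO_NOT_CARE test, then a plain replacement fold over the items; Pre_ only excludes inputs whose dict lacks the 'inform_slots' key, where A raises KeyError.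
import Mathlib
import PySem

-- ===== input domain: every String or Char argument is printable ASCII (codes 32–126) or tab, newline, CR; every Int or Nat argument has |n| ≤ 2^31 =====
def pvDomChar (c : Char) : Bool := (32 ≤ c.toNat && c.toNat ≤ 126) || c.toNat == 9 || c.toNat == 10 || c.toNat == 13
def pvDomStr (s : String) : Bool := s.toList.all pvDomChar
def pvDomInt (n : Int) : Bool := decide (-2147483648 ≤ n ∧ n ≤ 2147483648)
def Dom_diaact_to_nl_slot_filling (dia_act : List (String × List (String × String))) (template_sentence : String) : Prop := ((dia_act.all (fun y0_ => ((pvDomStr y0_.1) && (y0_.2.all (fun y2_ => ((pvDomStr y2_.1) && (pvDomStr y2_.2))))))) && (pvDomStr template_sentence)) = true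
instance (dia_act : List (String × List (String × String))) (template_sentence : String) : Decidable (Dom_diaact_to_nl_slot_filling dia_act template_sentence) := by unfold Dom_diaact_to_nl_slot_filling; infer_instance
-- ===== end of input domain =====

-- B replaces A's single interleaved loop (break + running counter + leftover-state check) by a
-- guard-first multi-pass structure: scan for the first NO_VALUE_MATCH slot, a non-empty/all-
-- I_DO_NOT_CARE test, then a plain replacement fold; same cost, different decomposition.


def pvIDNC : String := "I do not care"
def pvNVM : String := "NO VALUE MATCHES!!!"

-- shared hand-port of Python's str.replace(old, new, 1) on code points, exact for old ≠ []
-- (both Pythons call it only with the pattern '$'+slot+'$', which is never empty)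
def pvRep1 (s old new : List Char) : List Char :=
  let i := PySem.Chars.find s old
  if i = -1 then s else s.take i.toNat ++ new ++ s.drop (i.toNat + old.length)

-- ===== PORT A =====
-- A's for-loop: state = (sentence, counter); the NO_VALUE_MATCH branch is the 'break'
-- (the key comes from d.keys, so d.getD k "" is exactly Python's d[k])
def pvLoopA (d : PySem.Dict String String) : List String → List Char → Nat → List Char × Nat
  | [], s, c => (s, c)
  | k :: rest, s, c =>
    let v := d.getD k ""
    if v = pvNVM then ((k ++ " is not available!").toList, c)
    else if v = pvIDNC then pvLoopA d rest (pvRep1 s ('$' :: k.toList ++ ['$']) []) (c + 1)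
    else pvLoopA d rest (pvRep1 s ('$' :: k.toList ++ ['$']) v.toList) c

def diaact_to_nl_slot_filling (dia_act : List (String × List (String × String))) (template_sentence : String) : String :=
  match (PySem.Dict.ofList dia_act).get? "inform_slots" with
  | none => template_sentence   -- Python raises KeyError here; excluded by Pre_
  | some inform =>
    let d := PySem.Dict.ofList inform
    let r := pvLoopA d d.keys template_sentence.toList 0
    if 0 < r.2 ∧ r.2 = d.size then pvIDNC else String.ofList r.1

-- ===== PORT B =====
-- first guard pass: the slot of the first NO_VALUE_MATCH value, if any
def pvFindNVM : List (String × String) → Option String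
  | [] => none
  | (k, v) :: rest => if v = pvNVM then some k else pvFindNVM rest

-- plain replacement fold over the items
def pvFillB : List (String × String) → List Char → List Char
  | [], s => s
  | (k, v) :: rest, s =>
      pvFillB rest (pvRep1 s ('$' :: k.toList ++ ['$']) (if v = pvIDNC then [] else v.toList))

def diaact_to_nl_slot_filling_alt (dia_act : List (String × List (String × String))) (template_sentence : String) : String :=
  match (PySem.Dict.ofList dia_act).get? "inform_slots" with
  | none => template_sentence   -- Python raises KeyError here; excluded by Pre_
  | some inform =>
    let d := PySem.Dict.ofList inform
    match pvFindNVM d.items with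
    | some k => k ++ " is not available!"
    | none =>
      if d.size ≠ 0 ∧ d.values.all (fun v => v == pvIDNC) then pvIDNC
      else String.ofList (pvFillB d.items template_sentence.toList)

-- ===== PRECONDITION & SPEC =====
-- Pre_ excludes exactly the inputs whose dict lacks the key 'inform_slots', on which Python A raises KeyError.
def Pre_diaact_to_nl_slot_filling (dia_act : List (String × List (String × String))) (template_sentence : String) : Prop :=
  "inform_slots" ∈ dia_act.map Prod.fst
instance (dia_act : List (String × List (String × String))) (template_sentence : String) : Decidable (Pre_diaact_to_nl_slot_filling dia_act template_sentence) := by unfold Pre_diaact_to_nl_slot_filling; infer_instance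

def pvWitness_diaact_to_nl_slot_filling : (List (String × List (String × String))) × String :=
  ([("inform_slots", [("food", "pizza"), ("area", "I do not care")])], "the $food$ in $area$")

def Spec_diaact_to_nl_slot_filling (dia_act : List (String × List (String × String))) (template_sentence : String) (out : String) : Prop := out = diaact_to_nl_slot_filling_alt dia_act template_sentence
instance (dia_act : List (String × List (String × String))) (template_sentence : String) (out : String) : Decidable (Spec_diaact_to_nl_slot_filling dia_act template_sentence out) := by unfold Spec_diaact_to_nl_slot_filling; infer_instance

-- ===== CLAIM (what is proved, stated in full; the proofs are below) =====
def Claim_equal_diaact_to_nl_slot_filling : Prop := ∀ (dia_act : List (String × List (String × String))) (template_sentence : String), Dom_diaact_to_nl_slot_filling dia_act template_sentence → Pre_diaact_to_nl_slot_filling dia_act template_sentence → Spec_diaact_to_nl_slot_filling dia_act template_sentence (diaact_to_nl_slot_filling dia_act template_sentence)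

-- ===== LEMMAS AND PROOFS =====

theorem pvIDNC_ne_pvNVM : pvIDNC ≠ pvNVM := by decide

theorem pvFindNVM_eq_none_iff (ps : List (String × String)) :
    pvFindNVM ps = none ↔ ∀ p ∈ ps, p.2 ≠ pvNVM := by
  induction ps with
  | nil => simp [pvFindNVM]
  | cons p rest ih =>
    obtain ⟨k, v⟩ := p
    by_cases h : v = pvNVM <;> simp [pvFindNVM, h, ih]

theorem pvLoopA_no_nvm (d : PySem.Dict String String) (ks : List String) (s : List Char) (c : Nat)
    (h : ∀ k ∈ ks, d.getD k "" ≠ pvNVM) :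
    pvLoopA d ks s c =
      (pvFillB (ks.map fun k => (k, d.getD k "")) s,
       c + ks.countP (fun k => d.getD k "" == pvIDNC)) := by
  induction ks generalizing s c with
  | nil => simp [pvLoopA, pvFillB]
  | cons k rest ih =>
    have hk : d.getD k "" ≠ pvNVM := h k (by simp)
    have hrest : ∀ k' ∈ rest, d.getD k' "" ≠ pvNVM := fun k' hm => h k' (by simp [hm])
    by_cases hi : d.getD k "" = pvIDNC
    · rw [List.map_cons]
      simp [pvLoopA, pvFillB, hi, ih _ _ hrest, Prod.ext_iff, pvIDNC_ne_pvNVM]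
      omega
    · rw [List.map_cons]
      simp only [pvLoopA, pvFillB, if_neg hk, if_neg hi]
      rw [ih _ _ hrest]
      simp [hi]

theorem pvLoopA_nvm (d : PySem.Dict String String) (ks : List String) (s : List Char) (c : Nat)
    (k₀ : String) (h : pvFindNVM (ks.map fun k => (k, d.getD k "")) = some k₀) :
    (pvLoopA d ks s c).1 = (k₀ ++ " is not available!").toList ∧
    (pvLoopA d ks s c).2 < c + ks.length := by
  induction ks generalizing s c with
  | nil => simp [pvFindNVM] at h
  | cons k rest ih =>
    by_cases hk : d.getD k "" = pvNVM
    · simp [pvFindNVM, hk] at h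
      subst h
      simp [pvLoopA, hk]
    · simp [pvFindNVM, hk] at h
      by_cases hi : d.getD k "" = pvIDNC
      · simp only [pvLoopA, if_neg hk, if_pos hi]
        obtain ⟨h1, h2⟩ := ih (pvRep1 s ('$' :: k.toList ++ ['$']) []) (c + 1) h
        refine ⟨h1, ?_⟩
        simp only [List.length_cons]
        omega
      · simp only [pvLoopA, if_neg hk, if_neg hi]
        obtain ⟨h1, h2⟩ := ih (pvRep1 s ('$' :: k.toList ++ ['$']) (d.getD k "").toList) c h
        refine ⟨h1, ?_⟩
        simp only [List.length_cons]
        omega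

theorem mem_keys_update {κ ν : Type} [BEq κ] [LawfulBEq κ] (ps : List (κ × ν)) (d : PySem.Dict κ ν) (k : κ) :
    k ∈ (d.update ps).keys ↔ k ∈ d.keys ∨ k ∈ ps.map Prod.fst := by
  induction ps generalizing d with
  | nil => simp [PySem.Dict.update]
  | cons p rest ih =>
    simp [PySem.Dict.update] at ih ⊢
    rw [ih]
    simp [PySem.Dict.mem_keys_insert]
    tauto

-- ===== VERDICT (by name: the statement is the Claim_ definition above) =====
theorem diaact_to_nl_slot_filling_spec : Claim_equal_diaact_to_nl_slot_filling := by
  intro dia ts _hdom hpre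
  unfold Spec_diaact_to_nl_slot_filling
  unfold Pre_diaact_to_nl_slot_filling at hpre
  have hmem : "inform_slots" ∈ (PySem.Dict.ofList dia).keys := by
    rw [PySem.Dict.ofList, mem_keys_update]
    exact Or.inr hpre
  obtain ⟨inform, hsome⟩ : ∃ i, (PySem.Dict.ofList dia).get? "inform_slots" = some i := by
    cases hq : (PySem.Dict.ofList dia).get? "inform_slots" with
    | none => exact absurd hmem ((PySem.Dict.get?_eq_none_iff_not_mem_keys _ _).1 hq)
    | some v => exact ⟨v, rfl⟩
  simp only [diaact_to_nl_slot_filling, diaact_to_nl_slot_filling_alt, hsome]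
  have hnd := PySem.Dict.nodup_keys_ofList inform
  set d := PySem.Dict.ofList inform with hd
  have hitems := PySem.Dict.items_eq_map_keys d hnd ""
  have hsize : d.size = d.keys.length := by simp [PySem.Dict.size, PySem.Dict.keys]
  cases hf : pvFindNVM d.items with
  | some k₀ =>
    rw [hitems] at hf
    obtain ⟨h1, h2⟩ := pvLoopA_nvm d d.keys ts.toList 0 k₀ hf
    rw [if_neg (by omega), h1, String.ofList_toList]
  | none =>
    have hall : ∀ k ∈ d.keys, d.getD k "" ≠ pvNVM := by
      rw [pvFindNVM_eq_none_iff] at hf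
      intro k hk
      exact hf (k, d.getD k "") (by rw [hitems]; exact List.mem_map_of_mem hk)
    rw [pvLoopA_no_nvm d d.keys ts.toList 0 hall]
    have hvals : d.values = d.keys.map (fun k => d.getD k "") :=
      PySem.Dict.values_eq_map_keys d hnd ""
    have hcnt_le : d.keys.countP (fun k => d.getD k "" == pvIDNC) ≤ d.keys.length :=
      List.countP_le_length
    have hcond : (0 < 0 + d.keys.countP (fun k => d.getD k "" == pvIDNC) ∧
                  0 + d.keys.countP (fun k => d.getD k "" == pvIDNC) = d.size) ↔
                 (d.size ≠ 0 ∧ d.values.all (fun v => v == pvIDNC) = true) := by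
      rw [hvals, hsize]
      simp only [List.all_map, List.all_eq_true, Function.comp]
      constructor
      · rintro ⟨hpos, heq⟩
        refine ⟨by omega, ?_⟩
        rw [← List.countP_eq_length]
        omega
      · rintro ⟨hne, hall'⟩
        have : d.keys.countP (fun k => d.getD k "" == pvIDNC) = d.keys.length :=
          List.countP_eq_length.2 hall'
        omega
    by_cases hc : 0 < 0 + d.keys.countP (fun k => d.getD k "" == pvIDNC) ∧
                  0 + d.keys.countP (fun k => d.getD k "" == pvIDNC) = d.size
    · rw [if_pos hc, if_pos (hcond.1 hc)]
    · rw [if_neg hc, if_neg (fun h => hc (hcond.2 h)), hitems]
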